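-- pv_equiv track=rewrite | github.com/Rartiushkov/aws-dev-agent | executor/scripts/build_migration_strategy.py | aggregate_overall_status
-- ===== SOURCE A (Python) =====
-- def aggregate_overall_status(statuses):
--     statuses = list(statuses)
--     if any(status == "manual" for status in statuses):
--         return "partial"
--     if any(status == "partial" for status in statuses):
--         return "partial"
--     if any(status == "planned" for status in statuses):
--         return "planned"
--     return "covered"
-- ===== SOURCE B (Python) =====
-- def aggregate_overall_status(statuses):
--     has_partial = False
--     has_planned = False
--     for status in statuses:
--         if status == "manual" or status == "partial":
--             has_partial = True
--         elif status == "planned":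
--             has_planned = True
--     if has_partial:
--         return "partial"
--     if has_planned:
--         return "planned"
--     return "covered"
-- ===== Notes on version B (the rewrite author's own statement) =====
-- stated objective: simpler
-- what changed: Replaces the three separate any() scans with one pass that accumulates two booleans (has_partial, has_planned) and decides the result after the loop.
import Mathlib
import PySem

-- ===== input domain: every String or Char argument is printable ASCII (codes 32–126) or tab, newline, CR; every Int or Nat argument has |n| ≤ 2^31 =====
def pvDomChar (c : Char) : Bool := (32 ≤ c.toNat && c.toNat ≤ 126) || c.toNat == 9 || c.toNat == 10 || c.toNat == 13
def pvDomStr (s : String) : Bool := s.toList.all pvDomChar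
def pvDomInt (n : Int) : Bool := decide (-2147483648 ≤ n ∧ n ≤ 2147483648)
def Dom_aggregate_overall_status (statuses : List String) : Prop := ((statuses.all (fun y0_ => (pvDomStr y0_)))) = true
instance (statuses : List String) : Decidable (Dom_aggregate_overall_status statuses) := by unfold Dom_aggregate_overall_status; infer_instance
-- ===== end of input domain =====

-- B replaces A's three any() scans by one pass keeping two booleans (simpler decomposition, same O(n)).

-- ===== PORT A =====
def aggregate_overall_status (statuses : List String) : String :=
  if statuses.any (fun status => status == "manual") then "partial"
  else if statuses.any (fun status => status == "partial") then "partial"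
  else if statuses.any (fun status => status == "planned") then "planned"
  else "covered"

-- ===== PORT B =====
def aggregate_overall_status_alt (statuses : List String) : String :=
  let flags := statuses.foldl (fun (acc : Bool × Bool) status =>
    if status == "manual" || status == "partial" then (true, acc.2)
    else if status == "planned" then (acc.1, true)
    else acc) (false, false)
  if flags.1 then "partial"
  else if flags.2 then "planned"
  else "covered"

-- ===== PRECONDITION & SPEC =====
def Spec_aggregate_overall_status (statuses : List String) (out : String) : Prop := out = aggregate_overall_status_alt statuses
instance (statuses : List String) (out : String) : Decidable (Spec_aggregate_overall_status statuses out) := by unfold Spec_aggregate_overall_status; infer_instance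

-- ===== CLAIM (what is proved, stated in full; the proofs are below) =====
def Claim_equal_aggregate_overall_status : Prop := ∀ (statuses : List String), Dom_aggregate_overall_status statuses → Spec_aggregate_overall_status statuses (aggregate_overall_status statuses)

-- ===== LEMMAS AND PROOFS =====

-- the fold computes exactly the disjunctions of the two any-scans
theorem pv_fold_char (statuses : List String) (p q : Bool) :
    statuses.foldl (fun (acc : Bool × Bool) status =>
      if status == "manual" || status == "partial" then (true, acc.2)
      else if status == "planned" then (acc.1, true)
      else acc) (p, q)
    = (p || statuses.any (fun s => s == "manual") || statuses.any (fun s => s == "partial"),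
       q || statuses.any (fun s => s == "planned")) := by
  induction statuses generalizing p q with
  | nil => simp
  | cons h t ih =>
    simp only [List.foldl_cons, List.any_cons]
    by_cases hm : h == "manual" || h == "partial"
    · rw [if_pos hm, ih]
      rcases Bool.or_eq_true_iff.mp hm with h1 | h1 <;>
        (have he := eq_of_beq h1; subst he; simp)
    · rw [if_neg hm]
      have hm' : (h == "manual") = false ∧ (h == "partial") = false := by
        cases e1 : (h == "manual") <;> cases e2 : (h == "partial") <;> simp_all
      by_cases hp : h == "planned"
      · rw [if_pos hp, ih]; simp [hm'.1, hm'.2, hp]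
      · rw [if_neg hp, ih]
        have hp' : (h == "planned") = false := by simpa using hp
        simp [hm'.1, hm'.2, hp']

-- ===== VERDICT (by name: the statement is the Claim_ definition above) =====
theorem aggregate_overall_status_spec : Claim_equal_aggregate_overall_status := by
  intro statuses _
  unfold Spec_aggregate_overall_status aggregate_overall_status aggregate_overall_status_alt
  rw [pv_fold_char]
  simp only [Bool.false_or]
  by_cases h1 : statuses.any (fun s => s == "manual") <;>
  by_cases h2 : statuses.any (fun s => s == "partial") <;>
  by_cases h3 : statuses.any (fun s => s == "planned") <;>
  simp [h1, h2, h3]
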